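-- pv_equiv track=rewrite | github.com/super-lee-hub/fusion-reviewer | src/fusion_reviewer/evidence.py | serialize_page_index
-- ===== SOURCE A (Python) =====
-- def serialize_page_index(page_index: dict[int, list[str]], max_chars: int) -> str:
--     parts: list[str] = []
--     budget = max_chars
--     for page in sorted(page_index):
--         header = f"\n## Page {page}\n"
--         if len(header) > budget:
--             break
--         parts.append(header)
--         budget -= len(header)
--         for line_no, text in enumerate(page_index[page], start=1):
--             row = f"[P{page} L{line_no}] {text}\n"
--             if len(row) > budget:
--                 return "".join(parts).strip()
--             parts.append(row)
--             budget -= len(row)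
--     return "".join(parts).strip()
-- ===== SOURCE B (Python) =====
-- def serialize_page_index(page_index: dict[int, list[str]], max_chars: int) -> str:
--     # Phase 1: flat ordered list of all output pieces.
--     pieces: list[str] = []
--     for page in sorted(page_index):
--         pieces.append(f"\n## Page {page}\n")
--         for line_no, text in enumerate(page_index[page], start=1):
--             pieces.append(f"[P{page} L{line_no}] {text}\n")
--     # Phase 2: one uniform budget cutoff over the piece stream.
--     taken: list[str] = []
--     budget = max_chars
--     for piece in pieces:
--         if len(piece) > budget:
--             break
--         taken.append(piece)
--         budget -= len(piece)
--     return "".join(taken).strip()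
-- ===== Notes on version B (the rewrite author's own statement) =====
-- stated objective: simpler
-- what changed: B replaces A's nested loop with two distinct exit points (outer break on an oversized header, inner early return on an oversized row) by first building the flat ordered stream of all output pieces and then applying one uniform budget cutoff that stops at the first piece exceeding the remaining budget.
import Mathlib
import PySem

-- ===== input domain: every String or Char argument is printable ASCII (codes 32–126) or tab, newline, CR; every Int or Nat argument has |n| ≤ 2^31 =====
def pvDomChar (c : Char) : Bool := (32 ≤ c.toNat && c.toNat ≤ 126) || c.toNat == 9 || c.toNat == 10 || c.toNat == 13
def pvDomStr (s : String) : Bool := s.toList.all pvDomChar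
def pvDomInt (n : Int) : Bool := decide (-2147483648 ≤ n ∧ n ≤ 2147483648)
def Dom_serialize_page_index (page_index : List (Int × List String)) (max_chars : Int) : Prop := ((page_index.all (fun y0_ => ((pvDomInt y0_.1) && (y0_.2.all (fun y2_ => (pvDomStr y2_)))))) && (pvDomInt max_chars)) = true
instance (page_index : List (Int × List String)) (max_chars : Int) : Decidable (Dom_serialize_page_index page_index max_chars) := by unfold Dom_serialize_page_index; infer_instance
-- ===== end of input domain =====

-- B collapses A's two exit points (outer break / inner return) into one flat
-- budget-cutoff loop over a pre-built piece stream; objective: simpler.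

-- shared f-string formatting (identical literals in both Pythons)
def pvHeader (page : Int) : List Char :=
  '\n' :: ("## Page ".toList ++ PySem.Int.toChars page ++ ['\n'])

def pvRowStr (page : Int) (lineNo : Int) (text : String) : List Char :=
  "[P".toList ++ PySem.Int.toChars page ++ " L".toList ++ PySem.Int.toChars lineNo
    ++ "] ".toList ++ text.toList ++ ['\n']

-- ===== PORT A =====
-- inner 'for line_no, text in enumerate(...)' loop; Bool = the early 'return' was hit
def pvRowsA (page : Int) : List String → Int → List (List Char) → Int → (List (List Char) × Int × Bool)
  | [], _, parts, budget => (parts, budget, false)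
  | text :: rest, lineNo, parts, budget =>
    let row := pvRowStr page lineNo text
    if (row.length : Int) > budget then (parts, budget, true)
    else pvRowsA page rest (lineNo + 1) (parts ++ [row]) (budget - row.length)

-- outer 'for page in sorted(page_index)' loop
def pvPagesA (d : PySem.Dict Int (List String)) : List Int → List (List Char) → Int → List (List Char)
  | [], parts, _ => parts
  | page :: rest, parts, budget =>
    let header := pvHeader page
    if (header.length : Int) > budget then parts
    else
      let r := pvRowsA page (d.getD page []) 1 (parts ++ [header]) (budget - header.length)
      if r.2.2 then r.1 else pvPagesA d rest r.1 r.2.1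

def serialize_page_index (page_index : List (Int × List String)) (max_chars : Int) : String :=
  String.ofList (PySem.Chars.strip
    (pvPagesA (PySem.Dict.ofList page_index)
      (PySem.List.sorted (PySem.Dict.ofList page_index).keys (fun x => x) false) [] max_chars).flatten)

-- ===== PORT B =====
-- phase 1: the flat ordered piece stream
def pvRowsB (page : Int) : List String → Int → List (List Char)
  | [], _ => []
  | text :: rest, lineNo => pvRowStr page lineNo text :: pvRowsB page rest (lineNo + 1)

def pvPieces (d : PySem.Dict Int (List String)) (ks : List Int) : List (List Char) :=
  ks.flatMap (fun page => pvHeader page :: pvRowsB page (d.getD page []) 1)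

-- phase 2: one budget cutoff
def pvCut : List (List Char) → Int → List (List Char)
  | [], _ => []
  | p :: rest, budget =>
    if (p.length : Int) > budget then [] else p :: pvCut rest (budget - p.length)

def serialize_page_index_alt (page_index : List (Int × List String)) (max_chars : Int) : String :=
  String.ofList (PySem.Chars.strip
    (pvCut (pvPieces (PySem.Dict.ofList page_index)
      (PySem.List.sorted (PySem.Dict.ofList page_index).keys (fun x => x) false)) max_chars).flatten)

-- ===== PRECONDITION & SPEC =====
def Spec_serialize_page_index (page_index : List (Int × List String)) (max_chars : Int) (out : String) : Prop := out = serialize_page_index_alt page_index max_chars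
instance (page_index : List (Int × List String)) (max_chars : Int) (out : String) : Decidable (Spec_serialize_page_index page_index max_chars out) := by unfold Spec_serialize_page_index; infer_instance

-- ===== CLAIM (what is proved, stated in full; the proofs are below) =====
def Claim_equal_serialize_page_index : Prop := ∀ (page_index : List (Int × List String)) (max_chars : Int), Dom_serialize_page_index page_index max_chars → Spec_serialize_page_index page_index max_chars (serialize_page_index page_index max_chars)

-- ===== LEMMAS AND PROOFS =====

-- cutoff with full state: (taken pieces, remaining budget, stopped early?)
def pvCutS : List (List Char) → Int → (List (List Char) × Int × Bool)
  | [], budget => ([], budget, false)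
  | p :: rest, budget =>
    if (p.length : Int) > budget then ([], budget, true)
    else
      let r := pvCutS rest (budget - p.length)
      (p :: r.1, r.2.1, r.2.2)

theorem pvCutS_all (xs : List (List Char)) (b : Int) (h : (pvCutS xs b).2.2 = false) :
    (pvCutS xs b).1 = xs := by
  induction xs generalizing b with
  | nil => rfl
  | cons p rest ih =>
    by_cases hb : (p.length : Int) > b
    · simp [pvCutS, hb] at h
    · simp only [pvCutS, if_neg hb] at h ⊢
      simp [ih _ h]

theorem pvCut_append (xs ys : List (List Char)) (b : Int) :
    pvCut (xs ++ ys) b =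
      (pvCutS xs b).1 ++ (if (pvCutS xs b).2.2 then [] else pvCut ys (pvCutS xs b).2.1) := by
  induction xs generalizing b with
  | nil => simp [pvCutS]
  | cons p rest ih =>
    by_cases h : (p.length : Int) > b
    · simp [pvCut, pvCutS, h]
    · simp only [List.cons_append, pvCut, pvCutS, if_neg h]
      by_cases hs : (pvCutS rest (b - (p.length : Int))).2.2 = true
      · simp [ih, hs]
      · simp [ih, hs]

-- A's inner loop = cutoff-with-state over B's row pieces
theorem pvRowsA_eq (page : Int) (texts : List String) (n : Int) (parts : List (List Char)) (b : Int) :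
    pvRowsA page texts n parts b =
      ((parts ++ (pvCutS (pvRowsB page texts n) b).1),
       (pvCutS (pvRowsB page texts n) b).2.1,
       (pvCutS (pvRowsB page texts n) b).2.2) := by
  induction texts generalizing n parts b with
  | nil => simp [pvRowsA, pvRowsB, pvCutS]
  | cons t rest ih =>
    simp only [pvRowsA, pvRowsB, pvCutS]
    split_ifs with h
    · simp
    · rw [ih]
      simp

-- A's outer loop = one flat cutoff over B's piece stream
theorem pvPagesA_eq (d : PySem.Dict Int (List String)) (ks : List Int)
    (parts : List (List Char)) (b : Int) :
    pvPagesA d ks parts b = parts ++ pvCut (pvPieces d ks) b := by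
  induction ks generalizing parts b with
  | nil => simp [pvPagesA, pvPieces, pvCut]
  | cons page rest ih =>
    by_cases h : ((pvHeader page).length : Int) > b
    · simp [pvPagesA, pvPieces, List.flatMap_cons, pvCut, h]
    · simp only [pvPagesA, pvPieces, List.flatMap_cons, if_neg h]
      rw [pvRowsA_eq, pvCut_append]
      simp only [pvCutS, if_neg h]
      by_cases hs : (pvCutS (pvRowsB page (d.getD page []) 1) (b - ((pvHeader page).length : Int))).2.2 = true
      · simp [hs]
      · rw [Bool.not_eq_true] at hs
        simp [hs, ih, pvPieces, pvCutS_all _ _ hs]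

-- ===== VERDICT (by name: the statement is the Claim_ definition above) =====
theorem serialize_page_index_spec : Claim_equal_serialize_page_index := by
  intro page_index max_chars _
  unfold Spec_serialize_page_index serialize_page_index serialize_page_index_alt
  rw [pvPagesA_eq, List.nil_append]
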